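-- pv_equiv track=rewrite | github.com/Jmetrics86/tweet-analyser | src/text_wrangling.py | term_processing
-- ===== SOURCE A (Python) =====
-- def term_processing(all_terms, stop_words):
--     """Processes all terms in a tweet into lists of hashtags, usertags and uncommon terms"""
--
--     hashtags = []
--     usertags = []
--     uncommon_terms = []
--
--     for term in all_terms:
--
--         if term.startswith('#'):
--             hashtags.append(term)
--
--         elif term.startswith('@'):
--             usertags.append(term)
--
--         elif term not in stop_words and not term.startswith(('#', '@')):
--             uncommon_terms.append(term)
--
--         else:
--             pass
--
--     return hashtags, usertags, uncommon_terms
-- ===== SOURCE B (Python) =====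
-- def term_processing(all_terms, stop_words):
--     """Processes all terms in a tweet into lists of hashtags, usertags and uncommon terms"""
--     hashtags = [t for t in all_terms if t.startswith('#')]
--     usertags = [t for t in all_terms if t.startswith('@')]
--     uncommon_terms = [t for t in all_terms
--                       if not t.startswith(('#', '@')) and t not in stop_words]
--     return hashtags, usertags, uncommon_terms
-- ===== Notes on version B (the rewrite author's own statement) =====
-- stated objective: idiomatic
-- what changed: Replaces the single branching accumulator loop with three independent list-comprehension passes, one per output bucket, each with its own predicate.
import Mathlib
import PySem

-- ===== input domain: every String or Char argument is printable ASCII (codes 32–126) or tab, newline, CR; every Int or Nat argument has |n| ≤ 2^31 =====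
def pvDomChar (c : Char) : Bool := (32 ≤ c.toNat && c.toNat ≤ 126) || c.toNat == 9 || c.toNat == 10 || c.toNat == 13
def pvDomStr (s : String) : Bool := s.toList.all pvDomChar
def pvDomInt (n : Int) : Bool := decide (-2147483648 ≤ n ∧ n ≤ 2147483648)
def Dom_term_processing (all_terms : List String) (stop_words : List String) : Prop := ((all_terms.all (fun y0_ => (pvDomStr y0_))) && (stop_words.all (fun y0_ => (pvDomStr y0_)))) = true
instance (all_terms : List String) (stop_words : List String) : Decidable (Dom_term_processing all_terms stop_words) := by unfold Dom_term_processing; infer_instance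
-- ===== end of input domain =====

-- B replaces A's single branching loop with three independent filter passes, one per bucket (idiomatic; same cost).

-- ===== PORT A =====
-- one pass, three accumulators, branches in A's order
def term_processing (all_terms : List String) (stop_words : List String) : List String × List String × List String :=
  all_terms.foldl (fun acc term =>
    if PySem.Str.startswith term "#" then (acc.1 ++ [term], acc.2.1, acc.2.2)
    else if PySem.Str.startswith term "@" then (acc.1, acc.2.1 ++ [term], acc.2.2)
    else if ¬ term ∈ stop_words ∧ !(PySem.Str.startswith term "#" || PySem.Str.startswith term "@") then
      (acc.1, acc.2.1, acc.2.2 ++ [term])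
    else acc) ([], [], [])

-- ===== PORT B =====
def term_processing_alt (all_terms : List String) (stop_words : List String) : List String × List String × List String :=
  (all_terms.filter (fun t => PySem.Str.startswith t "#"),
   all_terms.filter (fun t => PySem.Str.startswith t "@"),
   all_terms.filter (fun t => !(PySem.Str.startswith t "#" || PySem.Str.startswith t "@") && !stop_words.contains t))

-- ===== PRECONDITION & SPEC =====
def Spec_term_processing (all_terms : List String) (stop_words : List String) (out : List String × List String × List String) : Prop := out = term_processing_alt all_terms stop_words
instance (all_terms : List String) (stop_words : List String) (out : List String × List String × List String) : Decidable (Spec_term_processing all_terms stop_words out) := by unfold Spec_term_processing; infer_instance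

-- ===== CLAIM (what is proved, stated in full; the proofs are below) =====
def Claim_equal_term_processing : Prop := ∀ (all_terms : List String) (stop_words : List String), Dom_term_processing all_terms stop_words → Spec_term_processing all_terms stop_words (term_processing all_terms stop_words)

-- ===== LEMMAS AND PROOFS =====
theorem startswith_ne_char {t : List Char} {a b : Char} (hne : a ≠ b)
    (h : PySem.Chars.startswith t [a] = true) : PySem.Chars.startswith t [b] = false := by
  rcases (PySem.Chars.startswith_iff t [a]).mp h with ⟨r, hr⟩
  apply Bool.eq_false_iff.mpr
  intro hc
  rcases (PySem.Chars.startswith_iff t [b]).mp hc with ⟨r2, hr2⟩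
  rw [← hr] at hr2
  simp at hr2
  exact hne hr2.1.symm

theorem term_processing_fold (stop_words : List String) (l h u unc : List String) :
    l.foldl (fun acc term =>
      if PySem.Str.startswith term "#" then (acc.1 ++ [term], acc.2.1, acc.2.2)
      else if PySem.Str.startswith term "@" then (acc.1, acc.2.1 ++ [term], acc.2.2)
      else if ¬ term ∈ stop_words ∧ !(PySem.Str.startswith term "#" || PySem.Str.startswith term "@") then
        (acc.1, acc.2.1, acc.2.2 ++ [term])
      else acc) (h, u, unc)
    = (h ++ l.filter (fun t => PySem.Str.startswith t "#"),
       u ++ l.filter (fun t => PySem.Str.startswith t "@"),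
       unc ++ l.filter (fun t => !(PySem.Str.startswith t "#" || PySem.Str.startswith t "@") && !stop_words.contains t)) := by
  induction l generalizing h u unc with
  | nil => simp
  | cons t ts ih =>
    simp only [List.foldl_cons]
    simp [List.filter] at ih ⊢
    by_cases h1 : PySem.Chars.startswith t.toList ['#'] = true
    · have h2' := startswith_ne_char (by decide : '#' ≠ '@') h1
      simp [h1, h2', ih]
    · by_cases h2 : PySem.Chars.startswith t.toList ['@'] = true
      · simp [h1, h2, ih]
      · by_cases h3 : t ∈ stop_words
        · simp [h1, h2, h3, ih]
        · simp [h1, h2, h3, ih]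

-- ===== VERDICT (by name: the statement is the Claim_ definition above) =====
theorem term_processing_spec : Claim_equal_term_processing := by
  intro all_terms stop_words _
  unfold Spec_term_processing term_processing term_processing_alt
  simpa using term_processing_fold stop_words all_terms [] [] []
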